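-- pv_equiv track=rewrite | github.com/glimmercn/Euler-Project | src/solution/p169-2sum power/p169.py | f
-- ===== SOURCE A (Python) =====
-- def f(n):
--     '''f(n) is wrong'''
--
--     if n < 2 :
--         return 1
--     else:
--         if n % 2 == 1:
--             return f(n-1)
--         else:
--             sum = 0
--             for i in range(n//2+1):
--                 sum += f(i)
--             return sum
-- ===== SOURCE B (Python) =====
-- def f(n):
--     if n < 2:
--         return 1
--     vals = [1, 1]          # vals[i] = f(i)
--     pre = [1, 2]           # pre[i] = f(0)+...+f(i)
--     for k in range(2, n + 1):
--         v = pre[k // 2] if k % 2 == 0 else vals[k - 1]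
--         vals.append(v)
--         pre.append(pre[-1] + v)
--     return vals[n]
-- ===== Notes on version B (the rewrite author's own statement) =====
-- stated objective: faster
-- what changed: Replaced A's exponential top-down recursion (recomputing f(i) for every i up to n/2 at each even step) by a single bottom-up loop that tabulates f-values together with their running prefix sums.
import Mathlib
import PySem

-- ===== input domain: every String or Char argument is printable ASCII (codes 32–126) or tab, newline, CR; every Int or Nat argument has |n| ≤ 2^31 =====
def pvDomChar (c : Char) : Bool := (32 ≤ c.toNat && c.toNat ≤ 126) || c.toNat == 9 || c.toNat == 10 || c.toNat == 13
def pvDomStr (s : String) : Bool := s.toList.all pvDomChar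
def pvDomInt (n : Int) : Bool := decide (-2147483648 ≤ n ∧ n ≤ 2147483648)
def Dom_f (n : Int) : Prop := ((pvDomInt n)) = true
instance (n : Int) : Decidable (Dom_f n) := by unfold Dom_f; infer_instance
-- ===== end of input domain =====

-- B replaces A's exponential recursion by a bottom-up table with running prefix sums.

-- ===== PORT A =====
-- A's recursion carried out on the Nat value of n (exact: the n < 2 branch returns 1,
-- so the recursive cases only ever see n ≥ 2, where Int and Nat arithmetic agree).
def fA (k : Nat) : Int :=
  if k < 2 then 1
  else if k % 2 = 1 then fA (k - 1)
  else (List.range (k / 2 + 1)).attach.foldl (fun s i => s + fA i.1) 0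
termination_by k
decreasing_by
  · omega
  · have := List.mem_range.mp i.2; omega

def f (n : Int) : Int :=
  if n < 2 then 1 else fA n.toNat

-- ===== PORT B =====
-- one loop step of Source B's `for k in range(2, n+1)` body (k = j + 2)
def stepB (st : List Int × List Int) (j : Nat) : List Int × List Int :=
  let k := j + 2
  let v := if k % 2 = 0 then st.2.getD (k / 2) 0 else st.1.getD (k - 1) 0
  (st.1 ++ [v], st.2 ++ [st.2.getD (st.2.length - 1) 0 + v])

def f_alt (n : Int) : Int :=
  if n < 2 then 1
  else
    -- range(2, n+1) realized as the Nat range of its length, k = j + 2 (exact for n ≥ 2)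
    let st := (List.range (n.toNat - 1)).foldl stepB ([1, 1], [1, 2])
    st.1.getD n.toNat 0

-- ===== PRECONDITION & SPEC =====
def Spec_f (n : Int) (out : Int) : Prop := out = f_alt n
instance (n : Int) (out : Int) : Decidable (Spec_f n out) := by unfold Spec_f; infer_instance

-- ===== CLAIM (what is proved, stated in full; the proofs are below) =====
def Claim_equal_f : Prop := ∀ (n : Int), Dom_f n → Spec_f n (f n)

-- ===== LEMMAS AND PROOFS =====

-- prefix sums of fA: S t = fA 0 + … + fA (t-1)
def S (t : Nat) : Int := ((List.range t).map fA).sum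

theorem S_succ (t : Nat) : S (t + 1) = S t + fA t := by
  simp [S, List.range_succ]

theorem fA_lt (k : Nat) (h : k < 2) : fA k = 1 := by
  rw [fA]; simp [h]

theorem fA_odd (k : Nat) (h2 : 2 ≤ k) (h : k % 2 = 1) : fA k = fA (k - 1) := by
  rw [fA]; simp [h]; omega


theorem attach_foldl_sum (l : List Nat) :
    l.attach.foldl (fun s i => s + fA i.1) 0 = ((l.map fA).sum : Int) := by
  suffices h : ∀ (a : Int), l.attach.foldl (fun s i => s + fA i.1) a = a + (l.map fA).sum by
    simpa using h 0
  induction l with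
  | nil => intro a; simp
  | cons x xs ih =>
      intro a
      simp only [List.attach_cons, List.foldl_cons, List.foldl_map, List.map_cons, List.sum_cons]
      rw [ih (a + fA x)]; ring


theorem fA_even (k : Nat) (h2 : 2 ≤ k) (h : k % 2 = 0) : fA k = S (k / 2 + 1) := by
  rw [fA]
  have hk : ¬ k < 2 := by omega
  have h1 : ¬ k % 2 = 1 := by omega
  simp only [hk, if_false, h1]
  rw [S, attach_foldl_sum]

theorem getD_map_range (g : Nat → Int) (m i : Nat) (h : i < m) :
    ((List.range m).map g).getD i 0 = g i := by
  rw [List.getD_eq_getElem?_getD]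
  simp [h]

-- loop invariant: after j iterations the tables hold f-values and prefix sums up to j+1
theorem loop_inv (j : Nat) :
    (List.range j).foldl stepB ([1, 1], [1, 2]) =
      ((List.range (j + 2)).map fA, (List.range (j + 2)).map (fun i => S (i + 1))) := by
  induction j with
  | zero =>
      have h0 : fA 0 = 1 := fA_lt 0 (by omega)
      have h1 : fA 1 = 1 := fA_lt 1 (by omega)
      simp [List.range_succ, S, h0, h1]
  | succ j ih =>
      rw [List.range_succ, List.foldl_append, ih]
      simp only [List.foldl_cons, List.foldl_nil, stepB, List.length_map, List.length_range]
      have hlast : ((List.range (j + 2)).map (fun i => S (i + 1))).getD (j + 2 - 1) 0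
          = S (j + 2) := by
        have : j + 2 - 1 = j + 1 := by omega
        rw [this]; exact getD_map_range _ _ _ (by omega)
      have hv : (if (j + 2) % 2 = 0 then
              ((List.range (j + 2)).map (fun i => S (i + 1))).getD ((j + 2) / 2) 0
            else ((List.range (j + 2)).map fA).getD (j + 2 - 1) 0) = fA (j + 2) := by
        by_cases he : (j + 2) % 2 = 0
        · rw [if_pos he, getD_map_range _ _ _ (by omega), fA_even (j + 2) (by omega) he]
        · rw [if_neg he]
          have h1 : j + 2 - 1 = j + 1 := by omega
          rw [h1, getD_map_range _ _ _ (by omega), fA_odd (j + 2) (by omega) (by omega), h1]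
      rw [hlast, hv, Prod.mk.injEq]
      constructor
      · simp [List.range_succ]
      · simp [List.range_succ, S_succ]

-- ===== VERDICT (by name: the statement is the Claim_ definition above) =====
theorem f_spec : Claim_equal_f := by
  intro n _
  unfold Spec_f f f_alt
  by_cases h : n < 2
  · simp [h]
  · simp only [h, if_false]
    rw [loop_inv]
    have hn : 2 ≤ n.toNat := by omega
    have : n.toNat - 1 + 2 = n.toNat + 1 := by omega
    rw [this]
    exact (getD_map_range fA _ _ (by omega)).symm
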